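-- pv_equiv track=rewrite | github.com/AntonHarris/advent-of-code | 2023/13.py | find_horizontal_mirror
-- ===== SOURCE A (Python) =====
-- def count_char_diff(line_1, line_2) -> int:
--     return sum(1 for char_1, char_2 in zip(line_1, line_2) if char_1 != char_2)
--
-- def find_horizontal_mirror(pattern, target=0) -> tuple[bool, int]:
--     half_start = len(pattern)//2 + (1 if len(pattern)%2 != 0 else 0)
--     for idx in range(1, half_start):
--         idx_copy, idx_mirror = idx, idx-1
--         count_diff = 0
--         while idx_mirror >= 0:
--             count_diff += count_char_diff(pattern[idx], pattern[idx_mirror])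
--             idx += 1
--             idx_mirror -= 1
--         if count_diff == target:
--             return True, idx_copy
--     half_start = half_start - (1 if len(pattern)%2 != 0 else 0)
--     for idx in range(half_start, len(pattern)-1):
--         idx_copy, idx_mirror = idx, idx+1
--         count_diff = 0
--         while idx_mirror < len(pattern):
--             count_diff += count_char_diff(pattern[idx], pattern[idx_mirror])
--             idx -= 1
--             idx_mirror += 1
--         if count_diff == target:
--             return True, idx_copy+1
--     return False, 0
-- ===== SOURCE B (Python) =====
-- def find_horizontal_mirror(pattern, target=0) -> tuple[bool, int]:
--     n = len(pattern)
--     for m in range(1, n):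
--         diff = 0
--         for above, below in zip(reversed(pattern[:m]), pattern[m:]):
--             diff += sum(c1 != c2 for c1, c2 in zip(above, below))
--             if diff > target:
--                 break
--         if diff == target:
--             return True, m
--     return False, 0
-- ===== Notes on version B (the rewrite author's own statement) =====
-- stated objective: simpler
-- what changed: B replaces A's two separate index-walking loops (manual idx/idx_mirror arithmetic plus a duplicated half_start computation) by one pass over all split positions m=1..n-1, comparing reversed(pattern[:m]) with pattern[m:] via zip and breaking out of a split early once the diff count exceeds target; this also checks the exact-middle split m=n/2 that A skips for even-length patterns.
-- intended difference: On even-length patterns whose exact-middle split (m = n/2) has diff count equal to target while no earlier split does, A skips that split (its first loop stops at n/2-1 and its second starts reporting at n/2+1) and returns (False, 0) or a later match, whereas B returns (True, n/2), the reflection the puzzle asks for. — e.g. on find_horizontal_mirror(["a", "a"], 0): A returns (false, 0), B returns (true, 1)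
import Mathlib
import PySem

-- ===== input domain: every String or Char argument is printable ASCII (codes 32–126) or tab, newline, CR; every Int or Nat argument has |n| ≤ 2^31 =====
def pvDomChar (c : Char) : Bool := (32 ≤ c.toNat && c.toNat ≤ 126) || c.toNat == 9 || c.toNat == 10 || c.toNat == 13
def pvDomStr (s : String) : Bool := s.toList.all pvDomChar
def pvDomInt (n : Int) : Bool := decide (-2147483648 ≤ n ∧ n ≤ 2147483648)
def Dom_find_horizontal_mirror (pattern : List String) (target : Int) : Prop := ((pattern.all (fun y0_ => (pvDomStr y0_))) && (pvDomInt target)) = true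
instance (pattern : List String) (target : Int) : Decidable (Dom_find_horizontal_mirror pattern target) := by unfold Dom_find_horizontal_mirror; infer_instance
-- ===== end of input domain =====

-- B: one pass over all split positions m=1..n-1 comparing reversed(pattern[:m]) with pattern[m:] (early exit once diff > target),
-- instead of A's two index-walking loops; B also checks the even-length middle split m=n/2 that A skips (see D_ below).


-- ===== PORT A =====
-- sum(1 for char_1, char_2 in zip(line_1, line_2) if char_1 != char_2)
def count_char_diff (line_1 line_2 : String) : Int :=
  (line_1.toList.zip line_2.toList).foldl (fun s cc => if cc.1 ≠ cc.2 then s + 1 else s) 0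

-- pattern[idx]: at every call site below the index is a valid non-negative position, so Python never raises; .getD "" is never reached
def pgA (p : List String) (i : Int) : String := (PySem.List.pyGet? p i).getD ""

-- 'while idx_mirror >= 0': fuel = number of iterations = (idx_mirror+1).toNat at entry; idx_mirror decreases by 1 each round
def whileA1 (p : List String) (idx mir cd : Int) : Nat → Int
  | 0 => cd
  | f + 1 => whileA1 p (idx + 1) (mir - 1) (cd + count_char_diff (pgA p idx) (pgA p mir)) f

-- first 'for idx in range(1, half_start)' with its early return
def loopA1 (p : List String) (target : Int) : List Int → Option (Bool × Int)
  | [] => none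
  | idx :: rest =>
    let cd := whileA1 p idx (idx - 1) 0 idx.toNat
    if cd = target then some (true, idx) else loopA1 p target rest

-- 'while idx_mirror < len(pattern)': fuel = (len - idx_mirror).toNat at entry; idx_mirror increases by 1 each round
def whileA2 (p : List String) (idx mir cd : Int) : Nat → Int
  | 0 => cd
  | f + 1 => whileA2 p (idx - 1) (mir + 1) (cd + count_char_diff (pgA p idx) (pgA p mir)) f

-- second 'for idx in range(half_start, len(pattern)-1)' with its early return
def loopA2 (p : List String) (target : Int) : List Int → Option (Bool × Int)
  | [] => none
  | idx :: rest =>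
    let cd := whileA2 p idx (idx + 1) 0 ((p.length : Int) - (idx + 1)).toNat
    if cd = target then some (true, idx + 1) else loopA2 p target rest

def find_horizontal_mirror (pattern : List String) (target : Int) : Bool × Int :=
  let n : Int := pattern.length
  let half_start := PySem.Int.floordiv n 2 + (if PySem.Int.mod n 2 ≠ 0 then 1 else 0)
  match loopA1 pattern target (PySem.List.pyRange 1 half_start 1) with
  | some r => r
  | none =>
    let half_start2 := half_start - (if PySem.Int.mod n 2 ≠ 0 then 1 else 0)
    match loopA2 pattern target (PySem.List.pyRange half_start2 (n - 1) 1) with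
    | some r => r
    | none => (false, 0)

-- ===== PORT B =====
-- sum(c1 != c2 for c1, c2 in zip(above, below)): a sum of 0/1 booleans
def row_diff (above below : String) : Int :=
  ((above.toList.zip below.toList).map (fun cc => if cc.1 ≠ cc.2 then (1 : Int) else 0)).sum

-- inner 'for above, below in zip(reversed(pattern[:m]), pattern[m:])' with its 'if diff > target: break'
def diff_loopB (target : Int) : List (String × String) → Int → Int
  | [], diff => diff
  | ab :: rest, diff =>
    let d := diff + row_diff ab.1 ab.2
    if d > target then d else diff_loopB target rest d

-- 'for m in range(1, n)' with its early return; reversed(pattern[:m]) = (take m).reverse, pattern[m:] = drop m (exact: 0 ≤ m ≤ n)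
def loopB (pattern : List String) (target : Int) : List Nat → Bool × Int
  | [] => (false, 0)
  | m :: rest =>
    let diff := diff_loopB target ((pattern.take m).reverse.zip (pattern.drop m)) 0
    if diff = target then (true, (m : Int)) else loopB pattern target rest

def find_horizontal_mirror_alt (pattern : List String) (target : Int) : Bool × Int :=
  loopB pattern target (List.range' 1 (pattern.length - 1))

-- ===== PRECONDITION & SPEC =====
-- diff count of the reflection at split m (pairs rows m-1-j and m+j, all m of them; D_ only uses splits with m ≤ n/2);
-- count_char_diff is A's own row-diff helper, reused here to inspect the input rows
def dMirror (p : List String) (m : Nat) : Int :=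
  ∑ j ∈ Finset.range m, count_char_diff (p.getD (m - 1 - j) "") (p.getD (m + j) "")

-- On even-length patterns whose exact-middle split m = n/2 has diff count = target while no earlier split does, A never
-- tests that split and returns (false, 0) or a later match, while B returns (true, n/2), the intended reflection.
def D_find_horizontal_mirror (pattern : List String) (target : Int) : Prop :=
  pattern ≠ [] ∧ Even pattern.length ∧
  dMirror pattern (pattern.length / 2) = target ∧
  ∀ m ∈ Finset.Ico 1 (pattern.length / 2), dMirror pattern m ≠ target

instance (pattern : List String) (target : Int) : Decidable (D_find_horizontal_mirror pattern target) := by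
  unfold D_find_horizontal_mirror; infer_instance

def Spec_find_horizontal_mirror (pattern : List String) (target : Int) (out : Bool × Int) : Prop :=
  ¬ D_find_horizontal_mirror pattern target → out = find_horizontal_mirror_alt pattern target
instance (pattern : List String) (target : Int) (out : Bool × Int) : Decidable (Spec_find_horizontal_mirror pattern target out) := by unfold Spec_find_horizontal_mirror; infer_instance

def pvDiffWitness_find_horizontal_mirror : List String × Int := (["a", "a"], 0)
def pvDiffWitnessOut_find_horizontal_mirror : (Bool × Int) × (Bool × Int) := ((false, 0), (true, 1))

-- ===== CLAIM (what is proved, stated in full; the proofs are below) =====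
def Claim_unchanged_find_horizontal_mirror : Prop := ∀ (pattern : List String) (target : Int), Dom_find_horizontal_mirror pattern target → Spec_find_horizontal_mirror pattern target (find_horizontal_mirror pattern target)
def Claim_changed_find_horizontal_mirror : Prop := Dom_find_horizontal_mirror (pvDiffWitness_find_horizontal_mirror.1) (pvDiffWitness_find_horizontal_mirror.2) ∧ D_find_horizontal_mirror (pvDiffWitness_find_horizontal_mirror.1) (pvDiffWitness_find_horizontal_mirror.2) ∧ find_horizontal_mirror (pvDiffWitness_find_horizontal_mirror.1) (pvDiffWitness_find_horizontal_mirror.2) = pvDiffWitnessOut_find_horizontal_mirror.1 ∧ find_horizontal_mirror_alt (pvDiffWitness_find_horizontal_mirror.1) (pvDiffWitness_find_horizontal_mirror.2) = pvDiffWitnessOut_find_horizontal_mirror.2 ∧ pvDiffWitnessOut_find_horizontal_mirror.1 ≠ pvDiffWitnessOut_find_horizontal_mirror.2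
def Claim_exact_find_horizontal_mirror : Prop := ∀ (pattern : List String) (target : Int), Dom_find_horizontal_mirror pattern target → D_find_horizontal_mirror pattern target → find_horizontal_mirror pattern target ≠ find_horizontal_mirror_alt pattern target

-- ===== LEMMAS AND PROOFS =====

-- proof-side: per-row diff count and the general reflection diff count (min m (n-m) pairs, any split m)
def dRowDiff (a b : String) : Int :=
  ((a.toList.zip b.toList).countP (fun cc => cc.1 ≠ cc.2) : Int)

def mval (p : List String) (m : Nat) : Int :=
  ∑ j ∈ Finset.range (min m (p.length - m)), dRowDiff (p.getD (m - 1 - j) "") (p.getD (m + j) "")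

-- the common "first split position whose reflection diff count equals target"
def firstM (p : List String) (target : Int) : List Nat → Option Nat
  | [] => none
  | m :: rest => if mval p m = target then some m else firstM p target rest

theorem firstM_append (p : List String) (target : Int) (l1 l2 : List Nat) :
    firstM p target (l1 ++ l2) = (firstM p target l1).or (firstM p target l2) := by
  induction l1 with
  | nil => simp [firstM]
  | cons m rest ih => by_cases h : mval p m = target <;> simp [firstM, h, ih]

theorem firstM_eq_none (p : List String) (target : Int) (l : List Nat) :
    firstM p target l = none ↔ ∀ m ∈ l, mval p m ≠ target := by
  induction l with
  | nil => simp [firstM]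
  | cons m rest ih => by_cases h : mval p m = target <;> simp [firstM, h, ih]

theorem firstM_mem (p : List String) (target : Int) (l : List Nat) (m : Nat)
    (h : firstM p target l = some m) : m ∈ l := by
  induction l with
  | nil => simp [firstM] at h
  | cons a rest ih =>
    by_cases ha : mval p a = target
    · simp [firstM, ha] at h; simp [h]
    · simp [firstM, ha] at h; exact List.mem_cons_of_mem _ (ih h)

theorem row_diff_eq (a b : String) : row_diff a b = dRowDiff a b := by
  simpa [row_diff, dRowDiff] using
    PySem.List.sum_map_ite_one_zero (fun cc : Char × Char => cc.1 ≠ cc.2) (a.toList.zip b.toList)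

theorem count_char_diff_eq (a b : String) : count_char_diff a b = dRowDiff a b := by
  simpa [count_char_diff, dRowDiff] using
    PySem.List.foldl_count_if (fun cc : Char × Char => cc.1 ≠ cc.2) (a.toList.zip b.toList) 0

theorem dMirror_eq_mval (p : List String) (m : Nat) (h : 2 * m ≤ p.length) :
    dMirror p m = mval p m := by
  unfold dMirror mval
  rw [show min m (p.length - m) = m from by omega]
  exact Finset.sum_congr rfl fun j _ => count_char_diff_eq _ _

theorem dRowDiff_nonneg (a b : String) : 0 ≤ dRowDiff a b := by
  simp [dRowDiff]

theorem dRowDiff_comm (a b : String) : dRowDiff a b = dRowDiff b a := by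
  simp only [dRowDiff, ← List.zip_swap b.toList a.toList, List.countP_map]
  congr 2
  funext cc
  simp [Function.comp, ne_comm]

theorem pgA_natCast (p : List String) (t : Nat) : pgA p (t : Int) = p.getD t "" := by
  simp [pgA, PySem.List.pyGet?_natCast, List.getD_eq_getElem?_getD]

-- zip of reversed prefix with suffix, elementwise
theorem zip_rev_take_drop (p : List String) (m : Nat) (hm : m ≤ p.length) :
    (p.take m).reverse.zip (p.drop m) =
      (List.range (min m (p.length - m))).map (fun j => (p.getD (m - 1 - j) "", p.getD (m + j) "")) := by
  apply List.ext_getElem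
  · simp only [List.length_zip, List.length_reverse, List.length_take, List.length_drop,
      List.length_map, List.length_range]
    omega
  · intro i h1 h2
    have hi : i < min m (p.length - m) := by simpa using h2
    have hm1 : m - 1 - i < p.length := by omega
    have hm2 : m + i < p.length := by omega
    simp only [List.getElem_zip, List.getElem_map, List.getElem_range, List.getElem_reverse,
      List.getElem_take, List.getElem_drop, List.getD_eq_getElem?_getD, List.getElem?_eq_getElem hm1,
      List.getElem?_eq_getElem hm2, Option.getD_some, Prod.mk.injEq]
    constructor
    · congr 1
      simp
      omega
    · trivial

theorem sum_map_range (h : Nat → Int) (K : Nat) :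
    ((List.range K).map h).sum = ∑ j ∈ Finset.range K, h j := by
  induction K with
  | zero => simp
  | succ k ih => rw [List.range_succ, List.map_append, List.sum_append, Finset.sum_range_succ, ih]; simp

-- early-exit inner loop computes "total = target" faithfully
theorem diff_loopB_eq_target (target : Int) (L : List (String × String)) (acc : Int) (hacc : 0 ≤ acc) :
    (diff_loopB target L acc = target ↔ acc + (L.map (fun ab => row_diff ab.1 ab.2)).sum = target) := by
  induction L generalizing acc with
  | nil => simp [diff_loopB]
  | cons ab rest ih =>
    have hrd : 0 ≤ row_diff ab.1 ab.2 := (row_diff_eq _ _) ▸ dRowDiff_nonneg _ _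
    have hsum : 0 ≤ (rest.map (fun ab => row_diff ab.1 ab.2)).sum := by
      apply List.sum_nonneg
      intro x hx
      obtain ⟨cd, _, rfl⟩ := List.mem_map.mp hx
      exact (row_diff_eq _ _) ▸ dRowDiff_nonneg _ _
    simp only [diff_loopB, List.map_cons, List.sum_cons]
    by_cases hbr : acc + row_diff ab.1 ab.2 > target
    · simp only [if_pos hbr]
      constructor <;> intro h <;> omega
    · rw [if_neg hbr, ih _ (by omega)]
      constructor <;> intro h <;> omega

theorem whileA1_sum (p : List String) (k : Nat) : ∀ (idx mir cd : Int),
    whileA1 p idx mir cd k = cd + ∑ j ∈ Finset.range k, count_char_diff (pgA p (idx + j)) (pgA p (mir - j)) := by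
  induction k with
  | zero => intro idx mir cd; simp [whileA1]
  | succ k ih =>
    intro idx mir cd
    rw [whileA1, ih, Finset.sum_range_succ']
    have he : ∀ j : Nat,
        count_char_diff (pgA p (idx + ((j : Int) + 1))) (pgA p (mir - ((j : Int) + 1))) =
        count_char_diff (pgA p (idx + 1 + (j : Int))) (pgA p (mir - 1 - (j : Int))) := by
      intro j
      rw [show idx + ((j : Int) + 1) = idx + 1 + (j : Int) from by ring,
          show mir - ((j : Int) + 1) = mir - 1 - (j : Int) from by ring]
    simp only [Nat.cast_add, Nat.cast_one, Nat.cast_zero, add_zero, sub_zero]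
    rw [Finset.sum_congr rfl (fun j _ => he j)]
    ring

theorem whileA2_sum (p : List String) (k : Nat) : ∀ (idx mir cd : Int),
    whileA2 p idx mir cd k = cd + ∑ j ∈ Finset.range k, count_char_diff (pgA p (idx - j)) (pgA p (mir + j)) := by
  induction k with
  | zero => intro idx mir cd; simp [whileA2]
  | succ k ih =>
    intro idx mir cd
    rw [whileA2, ih, Finset.sum_range_succ']
    have he : ∀ j : Nat,
        count_char_diff (pgA p (idx - ((j : Int) + 1))) (pgA p (mir + ((j : Int) + 1))) =
        count_char_diff (pgA p (idx - 1 - (j : Int))) (pgA p (mir + 1 + (j : Int))) := by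
      intro j
      rw [show idx - ((j : Int) + 1) = idx - 1 - (j : Int) from by ring,
          show mir + ((j : Int) + 1) = mir + 1 + (j : Int) from by ring]
    simp only [Nat.cast_add, Nat.cast_one, Nat.cast_zero, add_zero, sub_zero]
    rw [Finset.sum_congr rfl (fun j _ => he j)]
    ring

theorem whileA1_mval (p : List String) (m : Nat) (_h1 : 1 ≤ m) (h2 : 2 * m ≤ p.length) :
    whileA1 p (m : Int) ((m : Int) - 1) 0 ((m : Int)).toNat = mval p m := by
  rw [Int.toNat_natCast, whileA1_sum, zero_add]
  unfold mval
  rw [show min m (p.length - m) = m from by omega]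
  apply Finset.sum_congr rfl
  intro j hj
  have hj' : j < m := Finset.mem_range.mp hj
  have e1 : ((m : Int) + (j : Int)) = ((m + j : Nat) : Int) := by push_cast; ring
  have e2 : ((m : Int) - 1 - (j : Int)) = ((m - 1 - j : Nat) : Int) := by omega
  rw [e1, e2, pgA_natCast, pgA_natCast, count_char_diff_eq, dRowDiff_comm]

theorem whileA2_mval (p : List String) (i : Nat) (h1 : p.length ≤ 2 * i + 2) (h2 : i + 1 ≤ p.length) :
    whileA2 p (i : Int) ((i : Int) + 1) 0 ((p.length : Int) - ((i : Int) + 1)).toNat = mval p (i + 1) := by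
  rw [show ((p.length : Int) - ((i : Int) + 1)).toNat = p.length - (i + 1) from by omega,
    whileA2_sum, zero_add]
  unfold mval
  rw [show min (i + 1) (p.length - (i + 1)) = p.length - (i + 1) from by omega]
  apply Finset.sum_congr rfl
  intro j hj
  have hj' : j < p.length - (i + 1) := Finset.mem_range.mp hj
  have e1 : ((i : Int) - (j : Int)) = ((i + 1 - 1 - j : Nat) : Int) := by omega
  have e2 : ((i : Int) + 1 + (j : Int)) = ((i + 1 + j : Nat) : Int) := by push_cast; ring
  rw [e1, e2, pgA_natCast, pgA_natCast, count_char_diff_eq]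

theorem loopA1_eq (p : List String) (target : Int) (ms : List Nat)
    (h : ∀ m ∈ ms, 1 ≤ m ∧ 2 * m ≤ p.length) :
    loopA1 p target (ms.map (fun m : Nat => (m : Int))) =
      (firstM p target ms).map (fun m => (true, (m : Int))) := by
  induction ms with
  | nil => simp [loopA1, firstM]
  | cons m rest ih =>
    have hm := h m (by simp)
    have hrest : ∀ x ∈ rest, 1 ≤ x ∧ 2 * x ≤ p.length := fun x hx => h x (List.mem_cons_of_mem _ hx)
    simp only [List.map_cons, loopA1, whileA1_mval p m hm.1 hm.2, firstM, ih hrest]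
    by_cases hd : mval p m = target
    · simp [hd]
    · simp [hd]

theorem loopA2_eq (p : List String) (target : Int) (is : List Nat)
    (h : ∀ i ∈ is, p.length ≤ 2 * i + 2 ∧ i + 1 ≤ p.length) :
    loopA2 p target (is.map (fun i : Nat => (i : Int))) =
      (firstM p target (is.map (· + 1))).map (fun m => (true, (m : Int))) := by
  induction is with
  | nil => simp [loopA2, firstM]
  | cons i rest ih =>
    have hm := h i (by simp)
    have hrest : ∀ x ∈ rest, p.length ≤ 2 * x + 2 ∧ x + 1 ≤ p.length :=
      fun x hx => h x (List.mem_cons_of_mem _ hx)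
    simp only [List.map_cons, loopA2, whileA2_mval p i hm.1 hm.2, firstM, ih hrest]
    by_cases hd : mval p (i + 1) = target
    · simp [hd]
    · simp [hd]

theorem loopB_eq (p : List String) (target : Int) (ms : List Nat)
    (h : ∀ m ∈ ms, m ≤ p.length) :
    loopB p target ms =
      (match firstM p target ms with
       | some m => (true, (m : Int))
       | none => (false, 0)) := by
  induction ms with
  | nil => simp [loopB, firstM]
  | cons m rest ih =>
    have hm : m ≤ p.length := h m (by simp)
    have hrest : ∀ x ∈ rest, x ≤ p.length := fun x hx => h x (List.mem_cons_of_mem _ hx)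
    have hiff : (diff_loopB target ((p.take m).reverse.zip (p.drop m)) 0 = target) ↔
        mval p m = target := by
      rw [diff_loopB_eq_target target _ 0 le_rfl, zero_add, zip_rev_take_drop p m hm, List.map_map]
      have hs : ((List.range (min m (p.length - m))).map
          ((fun ab : String × String => row_diff ab.1 ab.2) ∘
            fun j => (p.getD (m - 1 - j) "", p.getD (m + j) ""))).sum = mval p m := by
        rw [sum_map_range]
        unfold mval
        exact Finset.sum_congr rfl (fun j _ => by simp [Function.comp, row_diff_eq])
      rw [hs]
    simp only [loopB, firstM]
    by_cases hd : mval p m = target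
    · rw [if_pos (hiff.mpr hd), if_pos hd]
    · rw [if_neg (fun hc => hd (hiff.mp hc)), if_neg hd, ih hrest]

theorem pyRange_cast (a : Nat) (b : Int) (K : Nat) (hK : (b - (a : Int)).toNat = K) :
    PySem.List.pyRange (a : Int) b 1 = (List.range' a K).map (fun m : Nat => (m : Int)) := by
  rw [PySem.List.pyRange_one, hK, List.range'_eq_map_range, List.map_map]
  apply List.map_congr_left
  intro k _
  simp [Function.comp]

theorem pyRange_cast1 (b : Int) (K : Nat) (hK : (b - 1).toNat = K) :
    PySem.List.pyRange 1 b 1 = (List.range' 1 K).map (fun m : Nat => (m : Int)) := by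
  have h := pyRange_cast 1 b K (by simpa using hK)
  simpa using h

theorem map_succ_range' (s K : Nat) :
    (List.range' s K).map (· + 1) = List.range' (s + 1) K := by
  rw [List.range'_eq_map_range, List.range'_eq_map_range, List.map_map]
  apply List.map_congr_left
  intro k _
  simp [Function.comp]
  omega

-- the positions A actually tests: [1 .. ⌈n/2⌉-1] then [n/2+1 .. n-1]
def msA (n : Nat) : List Nat :=
  List.range' 1 (n / 2 + n % 2 - 1) ++ List.range' (n / 2 + 1) (n - 1 - n / 2)

theorem A_match (p : List String) (target : Int) :
    find_horizontal_mirror p target =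
      (match firstM p target (msA p.length) with
       | some m => (true, (m : Int))
       | none => (false, 0)) := by
  have hfd : PySem.Int.floordiv (p.length : Int) 2 = ((p.length / 2 : Nat) : Int) := by
    exact_mod_cast PySem.Int.floordiv_natCast p.length 2
  have hmd : PySem.Int.mod (p.length : Int) 2 = ((p.length % 2 : Nat) : Int) := by
    exact_mod_cast PySem.Int.mod_natCast p.length 2
  have h2 : p.length % 2 = 0 ∨ p.length % 2 = 1 := by omega
  have key : ∀ (c : Int) (hc : c = (p.length % 2 : Nat)),
      find_horizontal_mirror p target =
        (match (firstM p target (List.range' 1 (p.length / 2 + p.length % 2 - 1))).or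
            (firstM p target (List.range' (p.length / 2 + 1) (p.length - 1 - p.length / 2))) with
         | some m => (true, (m : Int))
         | none => (false, 0)) := by
    intro c hc
    simp only [find_horizontal_mirror, hfd, hmd]
    have hif : (if ((p.length % 2 : Nat) : Int) ≠ 0 then (1 : Int) else 0) = ((p.length % 2 : Nat) : Int) := by
      rcases h2 with h | h <;> simp [h]
    rw [hif]
    rw [show ((p.length / 2 : Nat) : Int) + ((p.length % 2 : Nat) : Int) =
        (((p.length / 2 + p.length % 2 : Nat)) : Int) from by push_cast; ring]
    rw [pyRange_cast1 _ (p.length / 2 + p.length % 2 - 1) (by omega)]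
    rw [loopA1_eq p target _ (by
      intro m hm
      rw [List.mem_range'_1] at hm
      constructor <;> omega)]
    rw [show (((p.length / 2 + p.length % 2 : Nat)) : Int) - ((p.length % 2 : Nat) : Int) =
        ((p.length / 2 : Nat) : Int) from by push_cast; ring]
    rw [pyRange_cast (p.length / 2) ((p.length : Int) - 1) (p.length - 1 - p.length / 2) (by omega)]
    rw [loopA2_eq p target _ (by
      intro i hi
      rw [List.mem_range'_1] at hi
      constructor <;> omega)]
    rw [map_succ_range']
    cases hfm : firstM p target (List.range' 1 (p.length / 2 + p.length % 2 - 1)) with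
    | some r => simp [Option.or]
    | none =>
      simp only [Option.none_or]
      cases hfm2 : firstM p target (List.range' (p.length / 2 + 1) (p.length - 1 - p.length / 2)) <;>
        simp
  rw [key ((p.length % 2 : Nat) : Int) rfl, msA, firstM_append]

theorem B_match (p : List String) (target : Int) :
    find_horizontal_mirror_alt p target =
      (match firstM p target (List.range' 1 (p.length - 1)) with
       | some m => (true, (m : Int))
       | none => (false, 0)) := by
  rw [find_horizontal_mirror_alt, loopB_eq p target _ (by
    intro m hm
    rw [List.mem_range'_1] at hm
    omega)]

-- for even n ≥ 2, B's position list is A's with the middle split n/2 inserted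
theorem range_split_even (n : Nat) (h0 : n % 2 = 0) (h2 : 2 ≤ n) :
    List.range' 1 (n - 1) =
      List.range' 1 (n / 2 + n % 2 - 1) ++ (n / 2 :: List.range' (n / 2 + 1) (n - 1 - n / 2)) := by
  rw [show n - 1 - n / 2 = n / 2 - 1 from by omega, h0, Nat.add_zero]
  rw [show n - 1 = (n / 2 - 1) + (n / 2 - 1 + 1) from by omega]
  rw [← @List.range'_append 1 (n / 2 - 1) (n / 2 - 1 + 1) 1]
  rw [show 1 + 1 * (n / 2 - 1) = n / 2 from by omega]
  rw [List.range'_succ]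

-- for odd n, A's position list is exactly B's
theorem range_split_odd (n : Nat) (h1 : n % 2 = 1) :
    List.range' 1 (n - 1) =
      List.range' 1 (n / 2 + n % 2 - 1) ++ List.range' (n / 2 + 1) (n - 1 - n / 2) := by
  rw [show n - 1 - n / 2 = n / 2 from by omega, h1, show n / 2 + 1 - 1 = n / 2 from by omega]
  rw [show n - 1 = n / 2 + n / 2 from by omega]
  rw [← @List.range'_append 1 (n / 2) (n / 2) 1]
  rw [show 1 + 1 * (n / 2) = n / 2 + 1 from by omega]

-- ===== VERDICT (by name: the statement is the Claim_ definition above) =====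
theorem find_horizontal_mirror_spec : Claim_unchanged_find_horizontal_mirror := by
  intro p target _ hND
  show find_horizontal_mirror p target = find_horizontal_mirror_alt p target
  rw [A_match, B_match]
  rcases (by omega : p.length % 2 = 0 ∨ p.length % 2 = 1) with h0 | h1
  · by_cases hn2 : 2 ≤ p.length
    · rw [msA, firstM_append, range_split_even p.length h0 hn2, firstM_append]
      cases hfm : firstM p target (List.range' 1 (p.length / 2 + p.length % 2 - 1)) with
      | some r => simp [Option.or]
      | none =>
        simp only [Option.none_or]
        have hall : ∀ m ∈ Finset.Ico 1 (p.length / 2), mval p m ≠ target := by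
          intro m hm
          rw [Finset.mem_Ico] at hm
          exact (firstM_eq_none p target _).mp hfm m (List.mem_range'_1.mpr (by omega))
        have hne : p ≠ [] := by intro h; rw [h] at hn2; simp at hn2
        have hq : ¬ mval p (p.length / 2) = target := fun hq => hND ⟨hne, Nat.even_iff.mpr h0,
          by rw [dMirror_eq_mval p _ (by omega)]; exact hq,
          fun m hm => by
            rw [dMirror_eq_mval p m (by have := (Finset.mem_Ico.mp hm).2; omega)]
            exact hall m hm⟩
        rw [firstM, if_neg hq]
    · have h00 : p.length = 0 := by omega
      simp [msA, h00, firstM]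
  · rw [msA, range_split_odd p.length h1]

theorem find_horizontal_mirror_changed : Claim_changed_find_horizontal_mirror := by
  unfold Claim_changed_find_horizontal_mirror; decide

theorem find_horizontal_mirror_tight : Claim_exact_find_horizontal_mirror := by
  unfold Claim_exact_find_horizontal_mirror
  intro p target _ hD
  obtain ⟨hne, h0e, hqd, halld⟩ := hD
  have h0 : p.length % 2 = 0 := Nat.even_iff.mp h0e
  have hn2 : 2 ≤ p.length := by
    have h1 : p.length ≠ 0 := fun h => hne (List.length_eq_zero_iff.mp h)
    omega
  have hq : mval p (p.length / 2) = target := by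
    rw [← dMirror_eq_mval p _ (by omega)]; exact hqd
  have hall : ∀ m ∈ Finset.Ico 1 (p.length / 2), mval p m ≠ target := fun m hm => by
    rw [← dMirror_eq_mval p m (by have := (Finset.mem_Ico.mp hm).2; omega)]
    exact halld m hm
  rw [A_match, B_match, msA, firstM_append, range_split_even p.length h0 hn2, firstM_append]
  have hfm1 : firstM p target (List.range' 1 (p.length / 2 + p.length % 2 - 1)) = none := by
    rw [firstM_eq_none]
    intro m hm
    rw [List.mem_range'_1] at hm
    exact hall m (Finset.mem_Ico.mpr (by omega))
  rw [hfm1]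
  simp only [Option.none_or]
  rw [show firstM p target
      (p.length / 2 :: List.range' (p.length / 2 + 1) (p.length - 1 - p.length / 2)) =
      some (p.length / 2) from by rw [firstM, if_pos hq]]
  cases hfm2 : firstM p target (List.range' (p.length / 2 + 1) (p.length - 1 - p.length / 2)) with
  | none => simp
  | some r =>
    have hr := firstM_mem p target _ r hfm2
    rw [List.mem_range'_1] at hr
    intro heq
    simp only [Prod.mk.injEq] at heq
    have : r = p.length / 2 := by exact_mod_cast heq.2
    omega
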